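-- pv_equiv track=rewrite | github.com/sky-butterfly/coding-test | 프로그래머스/Level_0/공 던지기.py | solution
-- ===== SOURCE A (Python) =====
-- def solution(numbers, k):
--     answer = 0
--     size = len(numbers)
--     num = 0
--
--     for i in range(1, k):
--         num += 2
--         answer = num%size + 1
--
--     return answer
-- ===== SOURCE B (Python) =====
-- def solution(numbers, k):
--     if k <= 1:
--         return 0
--     return (2 * (k - 1)) % len(numbers) + 1
-- ===== Notes on version B (the rewrite author's own statement) =====
-- stated objective: faster
-- what changed: replaces the O(k) pass-simulation loop by the closed form (2*(k-1)) % len(numbers) + 1 (0 when k <= 1)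
import Mathlib
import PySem

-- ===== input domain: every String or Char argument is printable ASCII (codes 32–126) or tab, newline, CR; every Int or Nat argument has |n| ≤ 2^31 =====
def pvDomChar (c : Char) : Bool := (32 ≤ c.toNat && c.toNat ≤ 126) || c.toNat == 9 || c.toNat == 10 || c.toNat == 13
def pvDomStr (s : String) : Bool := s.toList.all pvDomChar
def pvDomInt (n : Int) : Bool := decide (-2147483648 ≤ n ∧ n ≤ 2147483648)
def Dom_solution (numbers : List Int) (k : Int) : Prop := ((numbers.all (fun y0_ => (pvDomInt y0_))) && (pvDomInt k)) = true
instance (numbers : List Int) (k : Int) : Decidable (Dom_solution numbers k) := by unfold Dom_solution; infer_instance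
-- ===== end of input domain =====

-- B replaces A's O(k) loop simulating the passes by the closed form (2*(k-1)) % size + 1 (0 when k ≤ 1).

-- ===== PORT A =====
-- size = len(numbers); state (answer, num); for i in range(1, k): num += 2; answer = num % size + 1
def solution (numbers : List Int) (k : Int) : Int :=
  ((PySem.List.pyRange 1 k 1).foldl
    (fun (p : Int × Int) _ => (PySem.Int.mod (p.2 + 2) (numbers.length : Int) + 1, p.2 + 2)) (0, 0)).1

-- ===== PORT B =====
def solution_alt (numbers : List Int) (k : Int) : Int :=
  if k ≤ 1 then 0
  else PySem.Int.mod (2 * (k - 1)) (numbers.length : Int) + 1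

-- ===== PRECONDITION & SPEC =====
-- Pre_ excludes exactly the inputs where Python A raises ZeroDivisionError (empty list with k ≥ 2).
def Pre_solution (numbers : List Int) (k : Int) : Prop := numbers ≠ [] ∨ k ≤ 1
instance (numbers : List Int) (k : Int) : Decidable (Pre_solution numbers k) := by unfold Pre_solution; infer_instance
def pvWitness_solution : List Int × Int := ([3, 1, 4], 5)

def Spec_solution (numbers : List Int) (k : Int) (out : Int) : Prop := out = solution_alt numbers k
instance (numbers : List Int) (k : Int) (out : Int) : Decidable (Spec_solution numbers k out) := by unfold Spec_solution; infer_instance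

-- ===== CLAIM (what is proved, stated in full; the proofs are below) =====
def Claim_equal_solution : Prop := ∀ (numbers : List Int) (k : Int), Dom_solution numbers k → Pre_solution numbers k → Spec_solution numbers k (solution numbers k)

-- ===== LEMMAS AND PROOFS =====

-- Invariant of A's loop: after folding any list, num has increased by 2 per element and,
-- if the list is nonempty, answer is num % size + 1 for the final num.
theorem solution_foldl_inv (size : Int) (l : List Int) (a n : Int) :
    l.foldl (fun (p : Int × Int) _ => (PySem.Int.mod (p.2 + 2) size + 1, p.2 + 2)) (a, n)
      = (if l = [] then a else PySem.Int.mod (n + 2 * l.length) size + 1, n + 2 * l.length) := by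
  induction l generalizing a n with
  | nil => simp
  | cons x xs ih =>
    simp only [List.foldl_cons, ih]
    rcases eq_or_ne xs ([] : List Int) with h | h
    · simp [h]
    · have h1 : n + 2 + 2 * (xs.length : Int) = n + 2 * ((xs.length : Int) + 1) := by ring
      simp [h, List.length_cons]
      rw [h1]
      exact ⟨rfl, rfl⟩

theorem solution_eq_closed (numbers : List Int) (k : Int) :
    solution numbers k = solution_alt numbers k := by
  unfold solution solution_alt
  by_cases hk : k ≤ 1
  · rw [PySem.List.pyRange_one_eq_nil (by omega)]
    simp [hk]
  · push Not at hk
    have hne : PySem.List.pyRange 1 k 1 ≠ [] := by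
      rw [PySem.List.pyRange_one_cons (by omega)]; simp
    rw [solution_foldl_inv]
    have hlen : ((PySem.List.pyRange 1 k 1).length : Int) = k - 1 := by
      rw [PySem.List.length_pyRange_one]; omega
    simp only [hne, hlen, if_false]
    rw [if_neg (by omega : ¬ k ≤ 1)]
    ring_nf

-- ===== VERDICT (by name: the statement is the Claim_ definition above) =====
theorem solution_spec : Claim_equal_solution := by
  intro numbers k _ _
  exact solution_eq_closed numbers k
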